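-- pv_equiv track=rewrite | github.com/oskari6/Studies | Mooc/Algo I/w3t8_dividend.py | find_profits
-- ===== SOURCE A (Python) =====
-- def find_profits(prices):
--     profits = []
--     best_buy_day = 0
--
--     for cur_day, cur_price in enumerate(prices):
--         profit = cur_price - prices[best_buy_day] + (cur_day - best_buy_day)
--         if cur_price - prices[cur_day] > cur_price - prices[best_buy_day] + (cur_day - best_buy_day):
--             best_buy_day = cur_day
--
--         profits.append(max(0, profit))
--
--     return profits
-- ===== SOURCE B (Python) =====
-- def find_profits(prices):
--     gains = [price + day for day, price in enumerate(prices)]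
--     return [g - min(gains[: day + 1]) for day, g in enumerate(gains)]
-- ===== Notes on version B (the rewrite author's own statement) =====
-- stated objective: simpler
-- what changed: Two staged comprehensions instead of A's stateful loop: first transform each price to price+day, then for each day subtract the minimum of the prefix of that transformed list (min over a slice), with no buy-day index, no conditional reset and no max(0,...) clamp.
import Mathlib
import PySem

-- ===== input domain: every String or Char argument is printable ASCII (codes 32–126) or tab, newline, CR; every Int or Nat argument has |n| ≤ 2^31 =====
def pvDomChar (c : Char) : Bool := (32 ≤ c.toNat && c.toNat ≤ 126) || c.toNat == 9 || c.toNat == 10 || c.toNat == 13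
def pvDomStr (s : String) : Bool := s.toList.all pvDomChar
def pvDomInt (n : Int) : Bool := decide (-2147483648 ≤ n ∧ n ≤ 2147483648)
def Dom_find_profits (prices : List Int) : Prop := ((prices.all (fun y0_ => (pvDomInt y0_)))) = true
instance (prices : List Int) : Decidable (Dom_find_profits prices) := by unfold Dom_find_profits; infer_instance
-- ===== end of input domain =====

-- B replaces A's stateful loop (buy-day index, reset test, max(0,·) clamp) by two staged
-- comprehensions: transform to price+day, then subtract the minimum of each prefix slice
-- (objective: simpler; B is quadratic, not faster). Return values proved equal on all inputs.

-- ===== PORT A =====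
-- prices[best_buy_day] and prices[cur_day]: the indices are always in range (cur_day comes
-- from enumerate, best_buy_day is a previous cur_day or 0 on a nonempty list), so pyGet? is
-- always some; .getD 0 only discharges the Option and is never the value used.
def find_profits (prices : List Int) : List Int :=
  ((PySem.List.enumerate prices).foldl
    (fun (st : List Int × Int) cd =>
      let profit := cd.2 - (PySem.List.pyGet? prices st.2).getD 0 + (cd.1 - st.2)
      let best :=
        if cd.2 - (PySem.List.pyGet? prices cd.1).getD 0 >
            cd.2 - (PySem.List.pyGet? prices st.2).getD 0 + (cd.1 - st.2)
        then cd.1 else st.2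
      (st.1 ++ [max 0 profit], best))
    ([], 0)).1

-- ===== PORT B =====
-- min(gains[:day+1]) is min of a nonempty slice (day < len gains), so min? is always some;
-- .getD 0 only discharges the Option.
def find_profits_alt (prices : List Int) : List Int :=
  let gains := (PySem.List.enumerate prices).map (fun dp => dp.2 + dp.1)
  (PySem.List.enumerate gains).map
    (fun dg => dg.2 -
      (PySem.List.min? (PySem.List.slice gains none (some (dg.1 + 1))) (fun y => y)).getD 0)

-- ===== PRECONDITION & SPEC =====
def Spec_find_profits (prices : List Int) (out : List Int) : Prop := out = find_profits_alt prices
instance (prices : List Int) (out : List Int) : Decidable (Spec_find_profits prices out) := by unfold Spec_find_profits; infer_instance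

-- ===== CLAIM (what is proved, stated in full; the proofs are below) =====
def Claim_equal_find_profits : Prop := ∀ (prices : List Int), Dom_find_profits prices → Spec_find_profits prices (find_profits prices)

-- ===== LEMMAS AND PROOFS =====

-- Common reference: run over the remaining transformed values with running minimum m.
def pvRun (m : Int) : List Int → List Int
  | [] => []
  | v :: rest => (v - min m v) :: pvRun (min m v) rest

-- A-side: A's fold from state (acc, b) with prices[b]+b = m, over pairs (i,p) with
-- prices[i] = p, produces acc ++ pvRun m over the transformed values p+i.
theorem pv_foldA (prices : List Int) (l : List (Int × Int))
    (h : ∀ q ∈ l, (PySem.List.pyGet? prices q.1).getD 0 = q.2)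
    (acc : List Int) (b m : Int)
    (hb : (PySem.List.pyGet? prices b).getD 0 + b = m) :
    (l.foldl
      (fun (st : List Int × Int) cd =>
        let profit := cd.2 - (PySem.List.pyGet? prices st.2).getD 0 + (cd.1 - st.2)
        let best :=
          if cd.2 - (PySem.List.pyGet? prices cd.1).getD 0 >
              cd.2 - (PySem.List.pyGet? prices st.2).getD 0 + (cd.1 - st.2)
          then cd.1 else st.2
        (st.1 ++ [max 0 profit], best))
      (acc, b)).1
    = acc ++ pvRun m (l.map (fun q => q.2 + q.1)) := by
  induction l generalizing acc b m with
  | nil => simp [pvRun]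
  | cons q l ih =>
    obtain ⟨i, p⟩ := q
    have hq : (PySem.List.pyGet? prices i).getD 0 = p := h (i, p) (List.mem_cons_self ..)
    have hl : ∀ q ∈ l, (PySem.List.pyGet? prices q.1).getD 0 = q.2 :=
      fun q hqm => h q (List.mem_cons_of_mem _ hqm)
    simp only [List.foldl_cons, List.map_cons, pvRun, hq]
    by_cases hlt : p + i < m
    · have hcond : p - p > p - (PySem.List.pyGet? prices b).getD 0 + (i - b) := by omega
      have h1 : max 0 (p - (PySem.List.pyGet? prices b).getD 0 + (i - b)) = 0 := by omega
      have h2 : min m (p + i) = p + i := by omega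
      simp only [if_pos hcond, h1, h2]
      rw [ih hl (acc ++ [0]) i (p + i) (by omega)]
      simp
    · have hcond : ¬ (p - p > p - (PySem.List.pyGet? prices b).getD 0 + (i - b)) := by omega
      have h1 : max 0 (p - (PySem.List.pyGet? prices b).getD 0 + (i - b)) = p + i - m := by omega
      have h2 : min m (p + i) = m := by omega
      simp only [if_neg hcond, h1, h2]
      rw [ih hl (acc ++ [p + i - m]) b m hb]
      simp

-- every pair produced by enumerate satisfies prices[i] = p
theorem pv_enum_get (prices : List Int) :
    ∀ q ∈ PySem.List.enumerate prices 0, (PySem.List.pyGet? prices q.1).getD 0 = q.2 := by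
  intro q hq
  rw [PySem.List.mem_enumerate_iff] at hq
  obtain ⟨k, hk, rfl⟩ := hq
  simp [hk]

-- B-side: mapping the prefix-minimum subtraction over the enumerated remainder t of
-- full = c ++ t, with c the nonempty consumed prefix of minimum m, yields pvRun m t.
theorem pv_mapB (full : List Int) (t : List Int) :
    ∀ (c0 : Int) (cr : List Int) (m : Int),
    full = (c0 :: cr) ++ t → cr.foldl min c0 = m →
    (PySem.List.enumerate t ((c0 :: cr).length : Int)).map
      (fun dg => dg.2 -
        (PySem.List.min? (PySem.List.slice full none (some (dg.1 + 1))) (fun y => y)).getD 0)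
    = pvRun m t := by
  induction t with
  | nil => intro _ _ _ _ _; simp [pvRun, PySem.List.enumerate_nil]
  | cons v rest ih =>
    intro c0 cr m hfull hm
    rw [PySem.List.enumerate_cons]
    simp only [List.map_cons, pvRun]
    have hslice : PySem.List.slice full none (some (((c0 :: cr).length : Int) + 1))
        = (c0 :: cr) ++ [v] := by
      have : ((c0 :: cr).length : Int) + 1 = (((c0 :: cr).length + 1 : Nat) : Int) := by
        push_cast; ring
      rw [this, PySem.List.slice_to_natCast, hfull]
      simp [List.take_append]
    have hmin : (PySem.List.min? ((c0 :: cr) ++ [v]) (fun y => y)).getD 0 = min m v := by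
      have : (c0 :: cr) ++ [v] = c0 :: (cr ++ [v]) := by simp
      rw [this, PySem.List.min?_id_cons, List.foldl_append, hm]
      simp
    rw [hslice, hmin]
    have hrec := ih c0 (cr ++ [v]) (min m v)
      (by simpa using hfull) (by rw [List.foldl_append, hm]; simp)
    have e : ((c0 :: (cr ++ [v])).length : Int) = ((c0 :: cr).length : Int) + 1 := by
      simp
    rw [e] at hrec
    rw [hrec]

-- ===== VERDICT (by name: the statement is the Claim_ definition above) =====
theorem find_profits_spec : Claim_equal_find_profits := by
  unfold Claim_equal_find_profits
  intro prices _
  unfold Spec_find_profits find_profits find_profits_alt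
  cases prices with
  | nil => rfl
  | cons p0 rest =>
    -- A side: first iteration appends 0 and keeps best = 0; then pv_foldA
    rw [PySem.List.enumerate_cons]
    simp only [List.foldl_cons]
    have hget0 : (PySem.List.pyGet? (p0 :: rest) (0 : Int)).getD 0 = p0 := by simp
    simp only [hget0]
    have hcond : ¬ (p0 - p0 > p0 - p0 + ((0 : Int) - 0)) := by omega
    have hA : max 0 (p0 - p0 + ((0 : Int) - 0)) = 0 := by omega
    simp only [if_neg hcond, hA]
    have henum : ∀ q ∈ PySem.List.enumerate rest (0 + 1),
        (PySem.List.pyGet? (p0 :: rest) q.1).getD 0 = q.2 := by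
      intro q hq
      have : PySem.List.enumerate (p0 :: rest) 0 = (0, p0) :: PySem.List.enumerate rest (0 + 1) :=
        PySem.List.enumerate_cons ..
      exact pv_enum_get (p0 :: rest) q (by rw [this]; exact List.mem_cons_of_mem _ hq)
    refine Eq.trans (pv_foldA (p0 :: rest) _ henum [0] 0 p0 (by simp)) ?_
    simp only [zero_add]
    -- B side: gains = (p0+0) :: transformed rest; first map step gives 0; then pv_mapB
    rw [List.map_cons]
    rw [PySem.List.enumerate_cons]
    simp only [List.map_cons, zero_add]
    have hslice0 : PySem.List.slice ((p0 + 0) ::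
        (PySem.List.enumerate rest 1).map (fun dp => dp.2 + dp.1)) none (some ((0 : Int) + 1))
        = [p0 + 0] := by
      have : ((0 : Int) + 1) = ((1 : Nat) : Int) := by norm_num
      rw [this, PySem.List.slice_to_natCast]
      simp
    have hslice0b : PySem.List.slice ((p0 + 0) ::
        (PySem.List.enumerate rest 1).map (fun dp => dp.2 + dp.1)) none (some (1 : Int))
        = [p0 + 0] := by
      rw [show ((1 : Int)) = ((1 : Nat) : Int) from by norm_num, PySem.List.slice_to_natCast]
      simp
    simp only [hslice0, hslice0b]
    have hmin0 : (PySem.List.min? [p0 + 0] (fun y => y)).getD 0 = p0 + 0 := by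
      rw [show ([p0 + 0] : List Int) = (p0 + 0) :: [] from rfl, PySem.List.min?_id_cons]; simp
    rw [hmin0]
    have hmapB := pv_mapB
      ((p0 + 0) :: (PySem.List.enumerate rest 1).map (fun dp => dp.2 + dp.1))
      ((PySem.List.enumerate rest 1).map (fun dp => dp.2 + dp.1))
      (p0 + 0) [] (p0 + 0) (by simp) (by simp)
    have e1 : (((p0 + 0) :: ([] : List Int)).length : Int) = (1 : Int) := by simp
    rw [e1] at hmapB
    rw [hmapB]
    simp
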